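-- pv_equiv track=rewrite | github.com/aborczuk/app-foundation | src/mcp_codebase/index/extractors/shell.py | _first_meaningful_line
-- ===== SOURCE A (Python) =====
-- def _first_meaningful_line(lines: list[str]) -> str:
--     for line in lines:
--         stripped = line.strip()
--         if stripped and not stripped.startswith("#"):
--             return stripped
--     for line in lines:
--         stripped = line.strip()
--         if stripped:
--             return stripped
--     return ""
-- ===== SOURCE B (Python) =====
-- def _first_meaningful_line(lines: list[str]) -> str:
--     fallback = None
--     for line in lines:
--         stripped = line.strip()
--         if stripped:
--             if not stripped.startswith("#"):
--                 return stripped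
--             if fallback is None:
--                 fallback = stripped
--     return fallback if fallback is not None else ""
-- ===== Notes on version B (the rewrite author's own statement) =====
-- stated objective: simpler
-- what changed: Collapses A's two passes over the list into a single pass that returns the first non-comment stripped line immediately and keeps the first non-empty stripped line as a fallback.
import Mathlib
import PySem

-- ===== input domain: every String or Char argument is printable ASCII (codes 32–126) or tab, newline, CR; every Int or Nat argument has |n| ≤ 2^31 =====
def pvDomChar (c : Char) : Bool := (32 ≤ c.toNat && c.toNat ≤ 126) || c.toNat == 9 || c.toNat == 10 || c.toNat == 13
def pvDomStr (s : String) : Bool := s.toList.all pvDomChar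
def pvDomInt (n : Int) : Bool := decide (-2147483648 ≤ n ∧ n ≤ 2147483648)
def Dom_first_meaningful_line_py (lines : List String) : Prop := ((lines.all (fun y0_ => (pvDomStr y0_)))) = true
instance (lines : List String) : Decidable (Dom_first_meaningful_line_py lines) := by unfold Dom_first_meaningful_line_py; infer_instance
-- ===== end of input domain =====

-- B is a single pass keeping the first non-empty stripped line as fallback, instead of A's two passes; return values only are claimed equal.

-- ===== PORT A =====
-- first loop of A: first stripped line that is non-empty and does not start with '#'
def fml_loop1 (lines : List String) : Option String :=
  match lines with
  | [] => none
  | l :: ls =>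
    let stripped := PySem.Str.strip l
    if stripped ≠ "" ∧ PySem.Str.startswith stripped "#" = false then some stripped
    else fml_loop1 ls

-- second loop of A: first non-empty stripped line
def fml_loop2 (lines : List String) : Option String :=
  match lines with
  | [] => none
  | l :: ls =>
    let stripped := PySem.Str.strip l
    if stripped ≠ "" then some stripped
    else fml_loop2 ls

def first_meaningful_line_py (lines : List String) : String :=
  match fml_loop1 lines with
  | some s => s
  | none =>
    match fml_loop2 lines with
    | some s => s
    | none => ""

-- ===== PORT B =====
def fml_go (lines : List String) (fallback : Option String) : String :=
  match lines with
  | [] => fallback.getD ""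
  | l :: ls =>
    let stripped := PySem.Str.strip l
    if stripped ≠ "" then
      if PySem.Str.startswith stripped "#" = false then stripped
      else fml_go ls (if fallback = none then some stripped else fallback)
    else fml_go ls fallback

def first_meaningful_line_py_alt (lines : List String) : String :=
  fml_go lines none

-- ===== PRECONDITION & SPEC =====
def Spec_first_meaningful_line_py (lines : List String) (out : String) : Prop := out = first_meaningful_line_py_alt lines
instance (lines : List String) (out : String) : Decidable (Spec_first_meaningful_line_py lines out) := by unfold Spec_first_meaningful_line_py; infer_instance

-- ===== CLAIM (what is proved, stated in full; the proofs are below) =====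
def Claim_equal_first_meaningful_line_py : Prop := ∀ (lines : List String), Dom_first_meaningful_line_py lines → Spec_first_meaningful_line_py lines (first_meaningful_line_py lines)

-- ===== LEMMAS AND PROOFS =====

-- loop invariant for B's single pass: it returns the first-pass result if any,
-- else the earlier-recorded fallback, else the first non-empty stripped line.
theorem fml_go_eq (lines : List String) (fb : Option String) :
    fml_go lines fb = (fml_loop1 lines).getD ((fb.or (fml_loop2 lines)).getD "") := by
  induction lines generalizing fb with
  | nil => simp [fml_go, fml_loop1, fml_loop2]
  | cons l ls ih =>
    by_cases h1 : PySem.Str.strip l = ""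
    · simp [fml_go, fml_loop1, fml_loop2, h1, ih]
    · by_cases h2 : PySem.Str.startswith (PySem.Str.strip l) "#" = false
      · simp at h2
        simp [fml_go, fml_loop1, fml_loop2, h1, h2]
      · have h2' : PySem.Str.startswith (PySem.Str.strip l) "#" = true := by
          cases h : PySem.Str.startswith (PySem.Str.strip l) "#"
          · exact absurd h h2
          · rfl
        simp at h2'
        simp only [fml_go, fml_loop1, fml_loop2]
        simp [h1, h2', ih]
        cases fb <;> simp

theorem fml_spec_aux (lines : List String) :
    first_meaningful_line_py lines = first_meaningful_line_py_alt lines := by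
  rw [first_meaningful_line_py_alt, fml_go_eq, first_meaningful_line_py]
  cases fml_loop1 lines <;> cases fml_loop2 lines <;> simp

-- ===== VERDICT (by name: the statement is the Claim_ definition above) =====
theorem first_meaningful_line_py_spec : Claim_equal_first_meaningful_line_py := by
  intro lines _
  unfold Spec_first_meaningful_line_py
  exact fml_spec_aux lines
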